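-- pv_equiv track=rewrite | github.com/flaviadcasag/assisted_living_phd_project | SKOYENdata_preparation.py | cleanSequenceT
-- ===== SOURCE A (Python) =====
-- def cleanSequenceT(sequence):
--
--     newSequence = []
--     for e in range(len(sequence)):
--         n = sequence[e]
--         if n.isdigit():
--             p = sequence[e-1]
--             op = p.swapcase()
--             for i in range(len(sequence[:e-1]), -1, -1):
--                 check = sequence[i]
--                 if check == op:
--                     seq = sequence[i:e-1]
--                     seq = [x for x in seq if (x.isdigit())]
--                     sumD = sum(list(map(int,seq)))
--                     if sumD < int(n):
--                         newSequence.append(n)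
--                     break
--         else:
--             newSequence.append(n)
--
--     return newSequence
-- ===== SOURCE B (Python) =====
-- def cleanSequenceT(sequence):
--     # One forward pass: prefix sums of digit values + dict of last index per string.
--     # A digit at position 0 has no preceding element, so it is dropped (A wraps around
--     # to sequence[-1] there; see the stated intended difference).
--     prefix = [0]
--     for x in sequence:
--         prefix.append(prefix[-1] + (int(x) if x.isdigit() else 0))
--     last = {}
--     out = []
--     for e, n in enumerate(sequence):
--         if n.isdigit():
--             if e > 0:
--                 i = last.get(sequence[e - 1].swapcase())
--                 if i is not None and prefix[e - 1] - prefix[i] < int(n):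
--                     out.append(n)
--         else:
--             out.append(n)
--         last[n] = e
--     return out
-- ===== Notes on version B (the rewrite author's own statement) =====
-- stated objective: alternative
-- what changed: Replaces A's per-digit backward scan plus digit-sum over a slice by one forward pass using a prefix-sum list of digit values and a dict mapping each string to its last index seen.
-- intended difference: On inputs whose first element is an all-digit string, A wraps around via sequence[-1] and may keep that digit when the swapcase of the LAST element matches somewhere with a small enough digit-sum (e.g. A(['5']) = ['5']); B drops a leading digit since it has no preceding element, which is the intended behaviour. — e.g. on cleanSequenceT(["5"]): A returns ["5"], B returns []
import Mathlib
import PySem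

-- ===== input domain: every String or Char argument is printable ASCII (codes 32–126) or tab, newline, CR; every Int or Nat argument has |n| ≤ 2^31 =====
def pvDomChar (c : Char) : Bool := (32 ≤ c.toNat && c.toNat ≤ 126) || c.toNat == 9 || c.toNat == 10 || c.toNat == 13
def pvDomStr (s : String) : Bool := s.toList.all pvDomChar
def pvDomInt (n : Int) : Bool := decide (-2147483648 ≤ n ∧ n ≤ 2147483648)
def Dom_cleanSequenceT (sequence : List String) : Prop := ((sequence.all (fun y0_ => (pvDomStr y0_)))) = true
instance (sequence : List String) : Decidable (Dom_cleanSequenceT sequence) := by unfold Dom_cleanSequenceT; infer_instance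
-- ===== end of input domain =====

-- B replaces A's per-digit backward scan and slice digit-sum by one forward pass with a
-- prefix-sum list of digit values and a dict of last index per string; a leading digit is dropped
-- by B instead of A's sequence[-1] wraparound (stated as the intended difference D_ below).

-- shared by both ports: s.swapcase() — hand-ported char-wise, exact on the ASCII domain
def pvSwapChar (c : Char) : Char :=
  if 97 ≤ c.toNat ∧ c.toNat ≤ 122 then Char.ofNat (c.toNat - 32)
  else if 65 ≤ c.toNat ∧ c.toNat ≤ 90 then Char.ofNat (c.toNat + 32)
  else c

def pvSwap (s : String) : String := String.ofList (s.toList.map pvSwapChar)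

-- int(x) on an all-digit string (both Pythons call it only under x.isdigit())
def pvInt (x : String) : Int := (PySem.Int.ofStr? x).getD 0

-- sum(list(map(int, [x for x in seq if x.isdigit()])))
def pvDigitSum (seq : List String) : Int :=
  ((seq.filter (fun x => PySem.Str.strIsdigit x)).map pvInt).sum

-- ===== PORT A =====
-- the inner 'for i in range(L, -1, -1): if sequence[i] == op: … break' — returns the break index
-- (every index visited is in range in the Python, so getD never sees its default)
def cleanAscan (sequence : List String) (op : String) : Nat → Option Nat
  | 0 => if sequence.getD 0 "" == op then some 0 else none
  | i + 1 => if sequence.getD (i + 1) "" == op then some (i + 1) else cleanAscan sequence op i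

def cleanSequenceT (sequence : List String) : List String :=
  (PySem.List.pyRange 0 sequence.length 1).foldl (fun newSequence e =>
    let n := PySem.List.pyGetD sequence e ""           -- sequence[e], e in range
    if PySem.Str.strIsdigit n then
      let p := PySem.List.pyGetD sequence (e - 1) ""   -- sequence[e-1]: Python negative index at e = 0
      let op := pvSwap p
      match cleanAscan sequence op (PySem.List.slice sequence (some 0) (some (e - 1))).length with
      | some i =>
          let seq := PySem.List.slice sequence (some (i : Int)) (some (e - 1))
          let sumD := pvDigitSum seq
          if sumD < pvInt n then newSequence ++ [n] else newSequence
      | none => newSequence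
    else newSequence ++ [n]) []

-- ===== PORT B =====
-- the body of B's single forward loop: st = (out, last); en = (e, n) from enumerate(sequence)
def cleanBstep (sequence : List String) (pre : List Int)
    (st : List String × PySem.Dict String Int) (en : Int × String) :
    List String × PySem.Dict String Int :=
  let e := en.1
  let n := en.2
  let out :=
    if PySem.Str.strIsdigit n then
      if 0 < e then
        match st.2.get? (pvSwap (PySem.List.pyGetD sequence (e - 1) "")) with
        | some i =>
            if PySem.List.pyGetD pre (e - 1) 0 - PySem.List.pyGetD pre i 0 < pvInt n
            then st.1 ++ [n] else st.1
        | none => st.1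
      else st.1
    else st.1 ++ [n]
  (out, st.2.insert n e)

def cleanSequenceT_alt (sequence : List String) : List String :=
  let pre : List Int := sequence.foldl
    (fun ps x => ps ++ [(ps.getLast?.getD 0) + (if PySem.Str.strIsdigit x then pvInt x else 0)]) [0]
  ((PySem.List.enumerate sequence 0).foldl (cleanBstep sequence pre) ([], PySem.Dict.empty)).1

-- ===== PRECONDITION & SPEC =====
-- On inputs whose first element is an all-digit string, A wraps around via sequence[-1] and keeps
-- that digit exactly when the swapcase of the LAST element occurs in the list with a matched-segment
-- digit-sum below it (e.g. A ["5"] = ["5"]); B drops a leading digit since it has no preceding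
-- element, which is the intended behaviour.
def pvFire (s : List String) : Bool :=
  match ((List.range s.length).filter (fun i => s.getD i "" == pvSwap (s.getLast?.getD ""))).getLast? with
  | some i => decide (pvDigitSum (s.take (s.length - 1)) - pvDigitSum (s.take i) < pvInt (s.headD ""))
  | none => false

def D_cleanSequenceT (sequence : List String) : Prop :=
  sequence ≠ [] ∧ PySem.Str.strIsdigit (sequence.headD "") = true ∧ pvFire sequence = true

instance (sequence : List String) : Decidable (D_cleanSequenceT sequence) := by
  unfold D_cleanSequenceT; infer_instance

def Spec_cleanSequenceT (sequence : List String) (out : List String) : Prop :=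
  ¬ D_cleanSequenceT sequence → out = cleanSequenceT_alt sequence

instance (sequence : List String) (out : List String) : Decidable (Spec_cleanSequenceT sequence out) := by
  unfold Spec_cleanSequenceT; infer_instance

def pvDiffWitness_cleanSequenceT : List String := ["5"]
def pvDiffWitnessOut_cleanSequenceT : (List String) × (List String) := (["5"], [])

-- ===== CLAIM (what is proved, stated in full; the proofs are below) =====
def Claim_unchanged_cleanSequenceT : Prop :=
  ∀ (sequence : List String), Dom_cleanSequenceT sequence → Spec_cleanSequenceT sequence (cleanSequenceT sequence)
def Claim_changed_cleanSequenceT : Prop :=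
  Dom_cleanSequenceT (pvDiffWitness_cleanSequenceT) ∧ D_cleanSequenceT (pvDiffWitness_cleanSequenceT) ∧
  cleanSequenceT (pvDiffWitness_cleanSequenceT) = pvDiffWitnessOut_cleanSequenceT.1 ∧
  cleanSequenceT_alt (pvDiffWitness_cleanSequenceT) = pvDiffWitnessOut_cleanSequenceT.2 ∧
  pvDiffWitnessOut_cleanSequenceT.1 ≠ pvDiffWitnessOut_cleanSequenceT.2
def Claim_exact_cleanSequenceT : Prop :=
  ∀ (sequence : List String), Dom_cleanSequenceT sequence → D_cleanSequenceT sequence →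
    cleanSequenceT sequence ≠ cleanSequenceT_alt sequence

-- ===== LEMMAS AND PROOFS =====

-- A's per-index step, factored out of the fold
def stepA (s : List String) (e : Nat) : List String :=
  let n := s.getD e ""
  if PySem.Str.strIsdigit n then
    let op := pvSwap (PySem.List.pyGetD s ((e : Int) - 1) "")
    match cleanAscan s op (PySem.List.slice s (some 0) (some ((e : Int) - 1))).length with
    | some i =>
        if pvDigitSum (PySem.List.slice s (some (i : Int)) (some ((e : Int) - 1))) < pvInt n
        then [n] else []
    | none => []
  else [n]

-- the common per-index step (B's semantics; A's too for e ≥ 1)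
def stepB (s : List String) (e : Nat) : List String :=
  let n := s.getD e ""
  if PySem.Str.strIsdigit n then
    if 0 < e then
      match cleanAscan s (pvSwap (s.getD (e - 1) "")) (e - 1) with
      | some i =>
          if pvDigitSum (s.take (e - 1)) - pvDigitSum (s.take i) < pvInt n then [n] else []
      | none => []
    else []
  else [n]

lemma cleanAscan_le (s : List String) (op : String) (m i : Nat)
    (h : cleanAscan s op m = some i) : i ≤ m := by
  induction m with
  | zero => simp [cleanAscan] at h; omega
  | succ k ih =>
    simp only [cleanAscan] at h
    split at h
    · simp_all
    · exact le_trans (ih h) (by omega)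

lemma digitSum_append (a b : List String) : pvDigitSum (a ++ b) = pvDigitSum a + pvDigitSum b := by
  simp [pvDigitSum]

lemma digitSum_take_sub (s : List String) (i k : Nat) (h : i ≤ k) :
    pvDigitSum ((s.drop i).take (k - i)) = pvDigitSum (s.take k) - pvDigitSum (s.take i) := by
  have hk : s.take k = s.take i ++ (s.drop i).take (k - i) := by
    have : k = i + (k - i) := by omega
    rw [this, List.take_add]; simp
  rw [hk, digitSum_append]; ring

lemma A_eq_flatMap (s : List String) :
    cleanSequenceT s = (List.range s.length).flatMap (stepA s) := by
  unfold cleanSequenceT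
  rw [PySem.List.pyRange_zero_natCast, List.foldl_map]
  rw [PySem.List.foldl_congr_mem _ _ (fun acc k => acc ++ stepA s k) _ ?_]
  · exact PySem.List.foldl_append_eq_flatMap (stepA s) (List.range s.length) []
  · intro acc k hk
    simp only [stepA, PySem.List.pyGetD_natCast]
    split
    · split
      · split <;> simp
      · simp
    · rfl

lemma stepA_eq_stepB (s : List String) (e : Nat) (he : 0 < e) (hl : e < s.length) :
    stepA s e = stepB s e := by
  have hcast : (e : Int) - 1 = ((e - 1 : Nat) : Int) := by omega
  simp only [stepA, stepB, hcast, PySem.List.pyGetD_natCast,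
    PySem.List.slice_zero_start, PySem.List.slice_to_natCast, PySem.List.slice_natCast]
  have hlen : (s.take (e - 1)).length = e - 1 := by
    rw [List.length_take]; omega
  rw [hlen, if_pos he]
  split
  next hdig =>
    split
    next i hscan =>
      have hle : i ≤ e - 1 := cleanAscan_le _ _ _ _ hscan
      rw [digitSum_take_sub s i (e-1) hle]
    next hscan => rfl
  next => rfl

-- the last-index dict that B's loop has built before processing index m
def dictUpTo (s : List String) : Nat → PySem.Dict String Int
  | 0 => PySem.Dict.empty
  | m + 1 => (dictUpTo s m).insert (s.getD m "") (m : Int)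

lemma dictUpTo_get (s : List String) (op : String) (m : Nat) :
    (dictUpTo s (m + 1)).get? op = (cleanAscan s op m).map (fun i => (i : Int)) := by
  induction m with
  | zero =>
    simp only [dictUpTo, cleanAscan, PySem.Dict.get?_insert, PySem.Dict.get?_empty, beq_iff_eq]
    by_cases h : op = s.getD 0 ""
    · simp [h]
    · rw [if_neg h, if_neg (Ne.symm h)]; rfl
  | succ k ih =>
    simp only [dictUpTo, cleanAscan, PySem.Dict.get?_insert] at *
    by_cases h : op = s.getD (k + 1) ""
    · simp [h]
    · simp only [if_neg h, ih, beq_iff_eq]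
      rw [if_neg (Ne.symm h)]

-- the prefix list built by B's first loop, as a function of position
def preTail (a : Int) : List String → List Int
  | [] => []
  | x :: t =>
    (a + (if PySem.Str.strIsdigit x then pvInt x else 0)) ::
      preTail (a + (if PySem.Str.strIsdigit x then pvInt x else 0)) t

lemma pre_fold (t : List String) : ∀ (ps : List Int) (a : Int), ps.getLast? = some a →
    t.foldl (fun ps x => ps ++ [(ps.getLast?.getD 0) + (if PySem.Str.strIsdigit x then pvInt x else 0)]) ps
      = ps ++ preTail a t := by
  induction t with
  | nil => intro ps a h; simp [preTail]
  | cons x tl ih =>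
    intro ps a h
    simp only [List.foldl_cons, preTail]
    rw [h]
    have := ih (ps ++ [a + (if PySem.Str.strIsdigit x then pvInt x else 0)])
      (a + (if PySem.Str.strIsdigit x then pvInt x else 0)) (by simp)
    simp only [Option.getD_some] at this ⊢
    rw [this]
    simp

lemma digitSum_cons (x : String) (l : List String) :
    pvDigitSum (x :: l) = (if PySem.Str.strIsdigit x then pvInt x else 0) + pvDigitSum l := by
  simp [pvDigitSum, List.filter_cons]
  split <;> simp

lemma preTail_getD (t : List String) : ∀ (a : Int) (k : Nat), k < t.length →
    (preTail a t).getD k 0 = a + pvDigitSum (t.take (k + 1)) := by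
  induction t with
  | nil => intro a k h; simp at h
  | cons x tl ih =>
    intro a k h
    cases k with
    | zero =>
      simp [preTail, pvDigitSum, List.filter_cons]
      split <;> simp
    | succ j =>
      simp only [preTail, List.getD_cons_succ]
      rw [ih _ j (by simpa using h)]
      rw [List.take_succ_cons, digitSum_cons]
      ring

lemma pre_getD (s : List String) (k : Nat) (hk : k ≤ s.length) :
    (s.foldl (fun ps x => ps ++ [(ps.getLast?.getD 0) + (if PySem.Str.strIsdigit x then pvInt x else 0)]) [0]).getD k 0
      = pvDigitSum (s.take k) := by
  rw [pre_fold s [0] 0 (by simp)]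
  cases k with
  | zero => simp [pvDigitSum]
  | succ j =>
    have : ((0 : Int) :: preTail 0 s).getD (j + 1) 0 = (preTail 0 s).getD j 0 := by simp
    simpa [this] using (by rw [preTail_getD s 0 j (by omega)]; ring :
      (preTail 0 s).getD j 0 = pvDigitSum (s.take (j+1)))

lemma B_go (s : List String) (pre : List Int)
    (hpre : ∀ k : Nat, k ≤ s.length → pre.getD k 0 = pvDigitSum (s.take k)) :
    ∀ (fuel m : Nat) (out : List String), s.length - m = fuel →
    ((PySem.List.enumerate (s.drop m) (m : Int)).foldl (cleanBstep s pre) (out, dictUpTo s m)).1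
      = out ++ (List.range' m (s.length - m)).flatMap (stepB s) := by
  intro fuel
  induction fuel with
  | zero =>
    intro m out h
    have hm : s.length ≤ m := by omega
    rw [List.drop_eq_nil_of_le hm]
    simp [PySem.List.enumerate, h]
  | succ f ih =>
    intro m out h
    have hm : m < s.length := by omega
    rw [List.drop_eq_getElem_cons hm, PySem.List.enumerate_cons, List.foldl_cons]
    have hgd : s.getD m "" = s[m] := List.getD_eq_getElem s "" hm
    have hstep : cleanBstep s pre (out, dictUpTo s m) ((m : Int), s[m]) =
        (out ++ stepB s m, dictUpTo s (m + 1)) := by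
      unfold cleanBstep stepB
      simp only [hgd]
      congr 1
      · by_cases hd : PySem.Str.strIsdigit s[m] = true
        · simp only [hd, if_pos]
          by_cases h0 : 0 < m
          · have hc : ((m : Int)) - 1 = ((m - 1 : Nat) : Int) := by omega
            rw [if_pos (by exact_mod_cast h0), if_pos h0]
            rw [hc, PySem.List.pyGetD_natCast]
            have hm1 : m - 1 + 1 = m := by omega
            rw [show dictUpTo s m = dictUpTo s (m - 1 + 1) by rw [hm1],
              dictUpTo_get s _ (m - 1)]
            cases hscan : cleanAscan s (pvSwap (s.getD (m - 1) "")) (m - 1) with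
            | none => simp
            | some i =>
              have hi : i ≤ m - 1 := cleanAscan_le _ _ _ _ hscan
              have h1 := hpre (m - 1) (by omega)
              have h2 := hpre i (by omega)
              rw [List.getD_eq_getElem?_getD] at h1 h2
              simp only [Option.pure_def, Option.bind_eq_bind, Option.bind_some, Option.map_some,
                PySem.List.pyGetD_natCast, List.getD_eq_getElem?_getD, h1, h2]
              split <;> simp
          · have : ¬ (0 : Int) < (m : Int) := by exact_mod_cast h0
            rw [if_neg this, if_neg h0]
            simp
        · simp only [Bool.not_eq_true] at hd
          have hd' : PySem.Chars.strIsdigit s[m].toList = false := by simpa using hd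
          simp [hd']
      · simp only [dictUpTo, hgd]
    rw [hstep]
    have hcast : (m : Int) + 1 = ((m + 1 : Nat) : Int) := by omega
    rw [hcast, ih (m + 1) (out ++ stepB s m) (by omega)]
    have hr : s.length - m = (s.length - (m + 1)) + 1 := by omega
    rw [hr, List.range'_succ, List.flatMap_cons, List.append_assoc]

lemma B_eq_flatMap (s : List String) :
    cleanSequenceT_alt s = (List.range s.length).flatMap (stepB s) := by
  unfold cleanSequenceT_alt
  have := B_go s _ (fun k hk => pre_getD s k hk) (s.length) 0 [] (by omega)
  simp only [List.drop_zero, Nat.cast_zero] at this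
  rw [show dictUpTo s 0 = PySem.Dict.empty from rfl] at this
  rw [this]
  simp [List.range_eq_range']

lemma cleanAscan_eq_filter (s : List String) (op : String) (m : Nat) :
    cleanAscan s op m = ((List.range (m+1)).filter (fun i => s.getD i "" == op)).getLast? := by
  induction m with
  | zero => simp [cleanAscan, List.range_succ]
  | succ k ih =>
    rw [List.range_succ, List.filter_append, List.getLast?_append]
    simp only [cleanAscan]
    split
    · simp_all
    · simp_all

-- A's step at index 0 on a digit head is governed by pvFire
lemma stepA_zero (s : List String) (h : s ≠ [])
    (hd : PySem.Str.strIsdigit (s.headD "") = true) :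
    stepA s 0 = if pvFire s then [s.headD ""] else [] := by
  have hn : s.getD 0 "" = s.headD "" := by
    cases s with
    | nil => simp at h
    | cons x t => rfl
  have hlp : s.length - 1 + 1 = s.length := by
    have : 0 < s.length := List.length_pos_iff.mpr h
    omega
  unfold stepA pvFire
  rw [hn]
  simp only [hd, if_pos, Nat.cast_zero, zero_sub, PySem.List.slice_zero_start,
    PySem.List.slice_to_neg_one, List.length_dropLast]
  rw [PySem.List.pyGetD_neg_one s "" h]
  have hgl : s.getLast h = s.getLast?.getD "" := by
    rw [List.getLast?_eq_some_getLast h]; rfl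
  rw [hgl, cleanAscan_eq_filter, hlp]
  cases hls : ((List.range s.length).filter
      (fun i => s.getD i "" == pvSwap (s.getLast?.getD ""))).getLast? with
  | none => simp
  | some i =>
    have hi : i < s.length :=
      List.mem_range.mp (List.mem_of_mem_filter (List.mem_of_getLast? hls))
    have hslice : PySem.List.slice s (some (i : Int)) (some (-1))
        = (s.drop i).take (s.length - 1 - i) := by
      simp [PySem.List.slice, Nat.min_eq_left (Nat.le_of_lt hi)]
    simp only [hslice, digitSum_take_sub s i (s.length - 1) (by omega)]
    simp

lemma getElem0_headD (s : List String) (h : s ≠ []) : s[0]?.getD "" = s.headD "" := by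
  cases s with
  | nil => simp at h
  | cons x t => rfl

lemma chars_isdigit_head (s : List String) (b : Bool) (hd : PySem.Str.strIsdigit (s.headD "") = b) :
    PySem.Chars.strIsdigit (s.head?.getD "").toList = b := by
  cases s <;> simpa using hd

-- ===== VERDICT (by name: the statement is the Claim_ definition above) =====
theorem cleanSequenceT_spec : Claim_unchanged_cleanSequenceT := by
  intro s _ hnD
  rw [A_eq_flatMap, B_eq_flatMap]
  apply List.flatMap_congr
  intro e he
  have hel : e < s.length := List.mem_range.mp he
  cases e with
  | succ k => exact stepA_eq_stepB s (k+1) (by omega) hel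
  | zero =>
    have hne : s ≠ [] := by
      intro hs; rw [hs] at hel; simp at hel
    by_cases hdig : PySem.Str.strIsdigit (s.headD "") = true
    · have hfire : pvFire s = false := by
        by_contra hf
        exact hnD ⟨hne, hdig, by simpa using hf⟩
      rw [stepA_zero s hne hdig, hfire]
      have hdig' := chars_isdigit_head s true hdig
      simp [stepB, getElem0_headD s hne, hdig']
    · simp only [Bool.not_eq_true] at hdig
      have hdig' := chars_isdigit_head s false hdig
      simp [stepA, stepB, getElem0_headD s hne, hdig']

theorem cleanSequenceT_changed : Claim_changed_cleanSequenceT := by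
  unfold Claim_changed_cleanSequenceT; decide

theorem cleanSequenceT_tight : Claim_exact_cleanSequenceT := by
  intro s _ hD
  obtain ⟨hne, hdig, hfire⟩ := hD
  rw [A_eq_flatMap, B_eq_flatMap]
  obtain ⟨k, hk⟩ : ∃ k, s.length = k + 1 := by
    cases hs : s.length with
    | zero => exact absurd (List.length_eq_zero_iff.mp hs) hne
    | succ k => exact ⟨k, rfl⟩
  rw [hk, List.range_succ_eq_map, List.flatMap_cons, List.flatMap_cons]
  have htail : (List.map Nat.succ (List.range k)).flatMap (stepA s)
      = (List.map Nat.succ (List.range k)).flatMap (stepB s) := by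
    apply List.flatMap_congr
    intro e he
    obtain ⟨j, hj, rfl⟩ := List.mem_map.mp he
    exact stepA_eq_stepB s j.succ (by omega) (by have := List.mem_range.mp hj; omega)
  rw [htail, stepA_zero s hne hdig, hfire]
  have hB0 : stepB s 0 = [] := by
    have hdig' := chars_isdigit_head s true hdig
    simp [stepB, getElem0_headD s hne, hdig']
  rw [hB0]
  intro hcontra
  have := congrArg List.length hcontra
  simp at this
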